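-- pv_equiv track=rewrite | github.com/FrunzyR/Matrici-pbinfo | 213/main.py | solve
-- ===== SOURCE A (Python) =====
-- def solve(rows):
--     new_list = []
--     for i in range(1, rows+1):
--         new_row = []
--         for j in range(1, rows+1):
--             if i*j >= 10:
--                 new_row.append((i * j) % 10)
--             else:
--                 new_row.append(i * j)
--         new_list.append(new_row)
--     return new_list
-- ===== SOURCE B (Python) =====
-- def solve(rows):
--     result = []
--     prev = None
--     for _ in range(rows):
--         if prev is None:
--             row = [j % 10 for j in range(1, rows + 1)]
--         else:
--             row = [(p + j) % 10 for p, j in zip(prev, range(1, rows + 1))]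
--         result.append(row)
--         prev = row
--     return result
-- ===== Notes on version B (the rewrite author's own statement) =====
-- stated objective: alternative
-- what changed: B builds each row from the previous one by the additive recurrence new[j-1]=(prev[j-1]+j)%10 (maintaining the previous row as running state) instead of computing i*j per cell with A's >=10 branch.
import Mathlib
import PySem

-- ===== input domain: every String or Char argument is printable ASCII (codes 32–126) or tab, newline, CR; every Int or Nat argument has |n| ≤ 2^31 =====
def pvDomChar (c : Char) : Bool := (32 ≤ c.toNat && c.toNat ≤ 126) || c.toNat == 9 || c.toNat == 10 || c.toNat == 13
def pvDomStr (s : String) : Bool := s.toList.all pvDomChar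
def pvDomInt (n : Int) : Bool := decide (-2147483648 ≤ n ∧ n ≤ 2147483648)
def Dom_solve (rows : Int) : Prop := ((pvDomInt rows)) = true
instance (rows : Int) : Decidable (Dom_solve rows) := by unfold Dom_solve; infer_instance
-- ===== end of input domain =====

-- B rebuilds each row additively from the previous row instead of multiplying per cell (objective: alternative).

-- ===== PORT A =====
def solve (rows : Int) : List (List Int) :=
  (PySem.List.pyRange 1 (rows + 1) 1).foldl (fun new_list i =>
    new_list ++ [(PySem.List.pyRange 1 (rows + 1) 1).foldl (fun new_row j =>
      new_row ++ [if i * j ≥ 10 then PySem.Int.mod (i * j) 10 else i * j]) []]) []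

-- ===== PORT B =====
def solve_alt (rows : Int) : List (List Int) :=
  ((PySem.List.pyRange 0 rows 1).foldl
    (fun (st : List (List Int) × Option (List Int)) _ =>
      let row : List Int :=
        match st.2 with
        | none => (PySem.List.pyRange 1 (rows + 1) 1).map (fun j => PySem.Int.mod j 10)
        | some prev =>
            (prev.zip (PySem.List.pyRange 1 (rows + 1) 1)).map
              (fun pj => PySem.Int.mod (pj.1 + pj.2) 10)
      (st.1 ++ [row], some row))
    ([], none)).1

-- ===== PRECONDITION & SPEC =====
def Spec_solve (rows : Int) (out : List (List Int)) : Prop := out = solve_alt rows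
instance (rows : Int) (out : List (List Int)) : Decidable (Spec_solve rows out) := by unfold Spec_solve; infer_instance

-- ===== CLAIM (what is proved, stated in full; the proofs are below) =====
def Claim_equal_solve : Prop := ∀ (rows : Int), Dom_solve rows → Spec_solve rows (solve rows)

-- ===== LEMMAS AND PROOFS =====

/-- The row of (i*j) % 10, j = 1..rows. -/
def rowOf (rows i : Int) : List Int :=
  (PySem.List.pyRange 1 (rows + 1) 1).map (fun j => PySem.Int.mod (i * j) 10)

/-- m consecutive rows starting at row index i. -/
def rangeRows (rows : Int) (i : Int) : Nat → List (List Int)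
  | 0 => []
  | m + 1 => rowOf rows i :: rangeRows rows (i + 1) m

theorem foldl_append_singleton {α β : Type} (f : α → β) :
    ∀ (l : List α) (init : List β),
      l.foldl (fun acc x => acc ++ [f x]) init = init ++ l.map f := by
  intro l
  induction l with
  | nil => simp
  | cons x xs ih => intro init; simp [List.foldl, ih]

theorem mod_shift (i j : Int) :
    PySem.Int.mod (PySem.Int.mod (i * j) 10 + j) 10 = PySem.Int.mod ((i + 1) * j) 10 := by
  rw [PySem.Int.mod_eq_emod_of_pos (by norm_num), PySem.Int.mod_eq_emod_of_pos (by norm_num),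
    PySem.Int.mod_eq_emod_of_pos (by norm_num), Int.emod_add_emod]
  ring_nf

theorem rowA_eq_rowOf (rows i : Int) (hi : 1 ≤ i) :
    (PySem.List.pyRange 1 (rows + 1) 1).foldl (fun new_row j =>
      new_row ++ [if i * j ≥ 10 then PySem.Int.mod (i * j) 10 else i * j]) []
      = rowOf rows i := by
  rw [foldl_append_singleton, List.nil_append, rowOf]
  apply List.map_congr_left
  intro j hj
  have hj1 : 1 ≤ j := (PySem.List.mem_pyRange_one.mp hj).1
  by_cases h : i * j ≥ 10
  · simp [h]
  · have h0 : 0 ≤ i * j := by positivity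
    simp only [if_neg h]
    rw [PySem.Int.mod_eq_emod_of_pos (by norm_num), Int.emod_eq_of_lt h0 (by omega)]

/-- B's step from a `some (rowOf rows i)` state produces `rowOf rows (i+1)`. -/
theorem step_row (rows i : Int) :
    ((rowOf rows i).zip (PySem.List.pyRange 1 (rows + 1) 1)).map
      (fun pj => PySem.Int.mod (pj.1 + pj.2) 10) = rowOf rows (i + 1) := by
  have hz : (rowOf rows i).zip (PySem.List.pyRange 1 (rows + 1) 1)
      = (PySem.List.pyRange 1 (rows + 1) 1).map
          (fun j => (PySem.Int.mod (i * j) 10, j)) := by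
    rw [rowOf]
    calc ((PySem.List.pyRange 1 (rows + 1) 1).map (fun j => PySem.Int.mod (i * j) 10)).zip
          (PySem.List.pyRange 1 (rows + 1) 1)
        = ((PySem.List.pyRange 1 (rows + 1) 1).map (fun j => PySem.Int.mod (i * j) 10)).zip
          ((PySem.List.pyRange 1 (rows + 1) 1).map id) := by simp
      _ = _ := by rw [List.zip_map']; simp
  rw [hz, List.map_map, rowOf]
  apply List.map_congr_left
  intro j _
  exact mod_shift i j

/-- Unrolling B's loop from a `some` state. -/
theorem loopB (rows : Int) (nr : List Int) :
    ∀ (l : List Int) (i : Int) (res : List (List Int)) (r : List Int), r = rowOf rows i →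
      (l.foldl
        (fun (st : List (List Int) × Option (List Int)) _ =>
          (st.1 ++ [match st.2 with
            | none => nr
            | some prev =>
                (prev.zip (PySem.List.pyRange 1 (rows + 1) 1)).map
                  (fun pj => PySem.Int.mod (pj.1 + pj.2) 10)],
           some (match st.2 with
            | none => nr
            | some prev =>
                (prev.zip (PySem.List.pyRange 1 (rows + 1) 1)).map
                  (fun pj => PySem.Int.mod (pj.1 + pj.2) 10))))
        (res, some r)).1 = res ++ rangeRows rows (i + 1) l.length := by
  intro l
  induction l with
  | nil => intro i res r _; simp [rangeRows]
  | cons x xs ih =>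
      intro i res r hr
      subst hr
      simp only [List.foldl, List.length_cons, rangeRows, step_row]
      rw [ih (i + 1) _ _ rfl]
      simp

/-- First row: j % 10 = (1*j) % 10. -/
theorem first_row (rows : Int) :
    (PySem.List.pyRange 1 (rows + 1) 1).map (fun j => PySem.Int.mod j 10) = rowOf rows 1 := by
  rw [rowOf]; simp

/-- A's rows, mapped over the range, are `rangeRows`. -/
theorem map_rowOf_eq_rangeRows (rows : Int) :
    ∀ (m : Nat) (i : Int),
      (PySem.List.pyRange i (i + m) 1).map (rowOf rows) = rangeRows rows i m := by
  intro m
  induction m with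
  | zero => intro i; rw [PySem.List.pyRange_one_eq_nil (by omega)]; simp [rangeRows]
  | succ k ih =>
      intro i
      rw [PySem.List.pyRange_one_cons (by omega)]
      have : i + ((k : Int) + 1) = (i + 1) + k := by ring
      push_cast
      rw [this]
      simp only [List.map_cons, rangeRows]
      exact congrArg _ (ih (i + 1))

-- ===== VERDICT (by name: the statement is the Claim_ definition above) =====
theorem solve_spec : Claim_equal_solve := by
  intro rows _
  unfold Spec_solve solve solve_alt
  by_cases hr : rows ≤ 0
  · rw [PySem.List.pyRange_one_eq_nil (by omega), PySem.List.pyRange_one_eq_nil (by omega)]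
    simp
  · push_neg at hr
    -- A side
    have hA : (PySem.List.pyRange 1 (rows + 1) 1).foldl (fun new_list i =>
        new_list ++ [(PySem.List.pyRange 1 (rows + 1) 1).foldl (fun new_row j =>
          new_row ++ [if i * j ≥ 10 then PySem.Int.mod (i * j) 10 else i * j]) []]) []
        = rangeRows rows 1 rows.toNat := by
      rw [foldl_append_singleton, List.nil_append]
      have hmap : (PySem.List.pyRange 1 (rows + 1) 1).map (fun i =>
          (PySem.List.pyRange 1 (rows + 1) 1).foldl (fun new_row j =>
            new_row ++ [if i * j ≥ 10 then PySem.Int.mod (i * j) 10 else i * j]) [])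
          = (PySem.List.pyRange 1 (rows + 1) 1).map (rowOf rows) := by
        apply List.map_congr_left
        intro i hi
        exact rowA_eq_rowOf rows i (PySem.List.mem_pyRange_one.mp hi).1
      rw [hmap]
      have h1 : rows + 1 = 1 + (rows.toNat : Int) := by omega
      rw [h1, map_rowOf_eq_rangeRows rows rows.toNat 1]
    rw [hA]
    -- B side
    have hcons : PySem.List.pyRange 0 rows 1 = 0 :: PySem.List.pyRange (0 + 1) rows 1 :=
      PySem.List.pyRange_one_cons (by omega)
    rw [hcons]
    simp only [List.foldl]
    rw [show (0 : Int) + 1 = 1 from rfl,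
      loopB rows _ (PySem.List.pyRange 1 rows 1) 1 _ _ (first_row rows)]
    rw [PySem.List.length_pyRange_one]
    have hn : rows.toNat = (rows - 1).toNat + 1 := by omega
    rw [hn]
    simp only [rangeRows, List.nil_append, List.cons_append]
    exact congrArg (· :: rangeRows rows 2 (rows - 1).toNat) (first_row rows).symm
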